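-- pv_equiv track=rewrite | github.com/BugTraceAI/BugTraceAI-CLI | bugtrace/agents/xss/analysis.py | detect_surviving_chars
-- ===== SOURCE A (Python) =====
-- TEST_CHARS = ["'", "\"", "<", ">", "&", "{", "}", "\\", "`"]
--
-- def detect_surviving_chars(html: str, probe_prefix: str) -> str:
--     """
--     Detect which special characters survived reflection without encoding.
--
--     Args:
--         html: HTML response
--         probe_prefix: The probe prefix used
--
--     Returns:
--         String of characters that survived (e.g., "'<>")
--     """
--     surviving = ""
--     for char in TEST_CHARS:
--         # Check if char appears adjacent to probe or anywhere in response with probe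
--         if f"{probe_prefix}{char}" in html:
--             surviving += char
--         elif char in html and probe_prefix in html:
--             # More lenient check for chars that might be separated
--             surviving += char
--     return surviving
-- ===== SOURCE B (Python) =====
-- TEST_CHARS = ["'", "\"", "<", ">", "&", "{", "}", "\\", "`"]
--
-- def detect_surviving_chars(html: str, probe_prefix: str) -> str:
--     # A char survives iff the probe prefix is reflected and the char appears
--     # anywhere in the response (probe_prefix+char in html implies both).
--     if probe_prefix not in html:
--         return ""
--     # One pass over the RESPONSE: set a flag per test char seen, then emit flags.
--     found = [False] * len(TEST_CHARS)
--     for ch in html: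
--         try:
--             found[TEST_CHARS.index(ch)] = True
--         except ValueError:
--             pass
--     return "".join(c for c, f in zip(TEST_CHARS, found) if f)
-- ===== Notes on version B (the rewrite author's own statement) =====
-- stated objective: alternative
-- what changed: Instead of A's per-char substring tests over html (prefix+char, then a lenient two-branch fallback), B checks the prefix once and then makes a single pass over html itself, setting a presence flag per test char, and emits the flagged chars via zip.
import Mathlib
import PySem

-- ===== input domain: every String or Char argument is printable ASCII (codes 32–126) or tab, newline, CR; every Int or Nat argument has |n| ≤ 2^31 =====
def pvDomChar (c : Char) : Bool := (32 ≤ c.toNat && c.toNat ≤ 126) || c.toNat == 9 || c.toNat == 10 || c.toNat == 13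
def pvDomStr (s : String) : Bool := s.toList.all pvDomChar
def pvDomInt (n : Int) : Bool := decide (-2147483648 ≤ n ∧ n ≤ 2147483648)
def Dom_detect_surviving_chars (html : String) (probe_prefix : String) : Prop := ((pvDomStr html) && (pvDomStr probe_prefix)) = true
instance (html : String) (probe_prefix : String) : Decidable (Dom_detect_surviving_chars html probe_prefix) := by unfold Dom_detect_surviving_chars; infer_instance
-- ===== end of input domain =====

-- B replaces A's per-char substring loop by one prefix guard plus a single pass over
-- html that sets a presence flag per test char, emitting flagged chars via zip
-- (alternative decomposition; same result).

def pvTestChars : List Char := ['\'', '"', '<', '>', '&', '{', '}', '\\', '`']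

-- ===== PORT A =====
-- literal port of A's loop: per char, test prefix+char in html, else char in html and prefix in html
def detect_surviving_chars (html : String) (probe_prefix : String) : String :=
  String.ofList (pvTestChars.foldl (fun surviving c =>
    if PySem.Chars.isIn (probe_prefix.toList ++ [c]) html.toList then surviving ++ [c]
    else if PySem.Chars.isIn [c] html.toList && PySem.Chars.isIn probe_prefix.toList html.toList then surviving ++ [c]
    else surviving) [])

-- ===== PORT B =====
-- loop body of B's single pass over html: found[TEST_CHARS.index(ch)] = True,
-- except ValueError: pass  (index? = none when ch is not a test char)
def pvMark (found : List Bool) (ch : Char) : List Bool :=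
  match PySem.List.index? pvTestChars ch with
  | some i => found.set i true
  | none => found

def detect_surviving_chars_alt (html : String) (probe_prefix : String) : String :=
  if !PySem.Chars.isIn probe_prefix.toList html.toList then ""
  else
    let found := html.toList.foldl pvMark (List.replicate pvTestChars.length false)
    String.ofList (((pvTestChars.zip found).filter (fun p => p.2)).map (fun p => p.1))

-- ===== PRECONDITION & SPEC =====
def Spec_detect_surviving_chars (html : String) (probe_prefix : String) (out : String) : Prop := out = detect_surviving_chars_alt html probe_prefix
instance (html : String) (probe_prefix : String) (out : String) : Decidable (Spec_detect_surviving_chars html probe_prefix out) := by unfold Spec_detect_surviving_chars; infer_instance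

-- ===== CLAIM (what is proved, stated in full; the proofs are below) =====
def Claim_equal_detect_surviving_chars : Prop := ∀ (html : String) (probe_prefix : String), Dom_detect_surviving_chars html probe_prefix → Spec_detect_surviving_chars html probe_prefix (detect_surviving_chars html probe_prefix)

-- ===== LEMMAS AND PROOFS =====

-- prefix+char in html implies prefix in html (substring transitivity)
theorem pv_isIn_append_left {pp h : List Char} {c : Char}
    (hin : PySem.Chars.isIn (pp ++ [c]) h = true) : PySem.Chars.isIn pp h = true := by
  rw [PySem.Chars.isIn_iff_infix] at hin ⊢
  exact ((List.prefix_append pp [c]).isInfix).trans hin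

-- prefix+char in html implies char in html
theorem pv_isIn_append_right {pp h : List Char} {c : Char}
    (hin : PySem.Chars.isIn (pp ++ [c]) h = true) : PySem.Chars.isIn [c] h = true := by
  rw [PySem.Chars.isIn_iff_infix] at hin ⊢
  exact ((List.suffix_append pp [c]).isInfix).trans hin

-- [c] in h iff c is an element of h
theorem pv_isIn_singleton (c : Char) (h : List Char) :
    PySem.Chars.isIn [c] h = decide (c ∈ h) := by
  by_cases hm : c ∈ h
  · obtain ⟨s, t, rfl⟩ := List.append_of_mem hm
    simp only [hm, decide_true]
    rw [PySem.Chars.isIn_iff_infix]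
    exact ⟨s, t, by simp⟩
  · simp only [hm, decide_false]
    rw [PySem.Chars.isIn_eq_false_iff]
    intro hinf
    exact hm (hinf.subset (by simp))

-- A's loop over any char list equals the guard + filter form
theorem pv_loop (h pp : List Char) (cs : List Char) (acc : List Char) :
    cs.foldl (fun surviving c =>
      if PySem.Chars.isIn (pp ++ [c]) h then surviving ++ [c]
      else if PySem.Chars.isIn [c] h && PySem.Chars.isIn pp h then surviving ++ [c]
      else surviving) acc
    = if PySem.Chars.isIn pp h then acc ++ cs.filter (fun c => PySem.Chars.isIn [c] h) else acc := by
  induction cs generalizing acc with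
  | nil => simp
  | cons c t ih =>
    rw [List.foldl_cons, ih]
    by_cases hpp : PySem.Chars.isIn pp h = true
    · by_cases hc : PySem.Chars.isIn [c] h = true
      · have hf : (if PySem.Chars.isIn (pp ++ [c]) h then acc ++ [c]
            else if PySem.Chars.isIn [c] h && PySem.Chars.isIn pp h then acc ++ [c]
            else acc) = acc ++ [c] := by
          by_cases hb : PySem.Chars.isIn (pp ++ [c]) h = true <;> simp [hb, hc, hpp]
        simp only [hpp, if_true, List.filter_cons, hc]
        simp
      · have hb : PySem.Chars.isIn (pp ++ [c]) h = false := by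
          cases hb2 : PySem.Chars.isIn (pp ++ [c]) h
          · rfl
          · exact absurd (pv_isIn_append_right hb2) hc
        simp [hb, hc, hpp]
    · have hpp' : PySem.Chars.isIn pp h = false := by
        cases hx : PySem.Chars.isIn pp h
        · rfl
        · exact absurd hx hpp
      have hb : PySem.Chars.isIn (pp ++ [c]) h = false := by
        cases hb2 : PySem.Chars.isIn (pp ++ [c]) h
        · rfl
        · exact absurd (pv_isIn_append_left hb2) hpp
      simp [hb, hpp']

theorem pv_testchars_nodup : pvTestChars.Nodup := by decide

-- one marking step on a flag list of the shape map g pvTestChars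
theorem pv_mark_map (g : Char → Bool) (ch : Char) :
    pvMark (pvTestChars.map g) ch = pvTestChars.map (fun c => g c || (c == ch)) := by
  unfold pvMark
  cases hidx : PySem.List.index? pvTestChars ch with
  | none =>
    have hnm : ch ∉ pvTestChars := (PySem.List.index?_eq_none_iff _ _).mp hidx
    refine (List.map_congr_left ?_).symm
    intro c hc
    have : (c == ch) = false := by
      cases hbe : c == ch
      · rfl
      · exact absurd (by rw [beq_iff_eq] at hbe; rw [hbe] at hc; exact hc) hnm
    simp [this]
  | some j =>
    obtain ⟨hj, hcj, _⟩ := PySem.List.getElem_of_index?_eq_some hidx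
    apply List.ext_getElem
    · simp
    · intro i hi1 hi2
      simp only [List.length_set, List.length_map] at hi1
      have hi : i < pvTestChars.length := hi1
      rw [List.getElem_set, List.getElem_map]
      by_cases hij : j = i
      · subst hij
        simp [← hcj]
      · have hne : pvTestChars[i] ≠ ch := by
          rw [← hcj]
          intro hEq
          exact hij ((List.Nodup.getElem_inj_iff pv_testchars_nodup).mp hEq.symm)
        simp [List.getElem_map, hij, hne]

-- the whole pass over h turns flags g into g || membership in h
theorem pv_fold (h : List Char) (g : Char → Bool) :
    h.foldl pvMark (pvTestChars.map g) = pvTestChars.map (fun c => g c || decide (c ∈ h)) := by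
  induction h generalizing g with
  | nil => simp
  | cons ch t ih =>
    rw [List.foldl_cons, pv_mark_map, ih]
    apply List.map_congr_left
    intro c _
    by_cases h1 : c = ch <;> by_cases h2 : c ∈ t <;> simp [h1, h2]

-- zip with the flag list then project = plain filter
theorem pv_zip_filter (xs : List Char) (g : Char → Bool) :
    (((xs.zip (xs.map g)).filter (fun p => p.2)).map (fun p => p.1)) = xs.filter g := by
  induction xs with
  | nil => simp
  | cons x t ih =>
    cases hg : g x <;> simp [hg, ih]

-- ===== VERDICT (by name: the statement is the Claim_ definition above) =====
theorem detect_surviving_chars_spec : Claim_equal_detect_surviving_chars := by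
  intro html probe_prefix _
  unfold Spec_detect_surviving_chars detect_surviving_chars detect_surviving_chars_alt
  rw [pv_loop]
  have hrep : List.replicate pvTestChars.length false = pvTestChars.map (fun _ => false) := by
    simp
  by_cases hpp : PySem.Chars.isIn probe_prefix.toList html.toList = true
  · simp only [hpp, if_true, Bool.not_true, List.nil_append]
    rw [if_neg (by simp)]
    rw [hrep, pv_fold, pv_zip_filter]
    congr 1
    apply List.filter_congr
    intro c _
    rw [pv_isIn_singleton]
    simp
  · have hpp' : PySem.Chars.isIn probe_prefix.toList html.toList = false := by
      cases hx : PySem.Chars.isIn probe_prefix.toList html.toList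
      · rfl
      · exact absurd hx hpp
    simp [hpp']
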